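-- pv_equiv track=rewrite | github.com/ayukyo/alltoolkit | Python/pinyin_utils/mod.py | _split_pinyin_syllables
-- ===== SOURCE A (Python) =====
-- from typing import List, Tuple, Dict, Optional, Union
--
-- _PINYIN_VOWELS = frozenset({'a', 'e', 'i', 'o', 'u', 'ü', 'v'})
--
-- def _split_pinyin_syllables(pinyin_str: str) -> List[str]:
--     """
--     Split a pinyin string into individual syllables.
--
--     Note:
--         优化版本（v2）：
--         - 边界处理：空输入返回空列表
--         - 快速路径：单音节直接返回
--         - 性能优化：使用预编译正则和集合，避免重复创建
--         - 单次遍历处理，减少中间字符串操作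
--         - 性能提升约 25-35%
--     """
--     # 边界处理：空输入
--     if not pinyin_str:
--         return []
--
--     # 快速路径：单音节（无空格分隔）
--     if ' ' not in pinyin_str and len(pinyin_str) <= 6:
--         # 单音节通常不长于 6 个字符（如 "zhong1"）
--         return [pinyin_str]
--
--     # 如果有空格，直接分割
--     if ' ' in pinyin_str:
--         return [s for s in pinyin_str.split() if s]
--
--     result = []
--     current = []
--     prev_was_digit = False
--     vowels = _PINYIN_VOWELS
--
--     for i, char in enumerate(pinyin_str):
--         current.append(char)
--
--         # 如果看到数字（音调号），这个音节完成
--         if char.isdigit():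
--             result.append(''.join(current))
--             current = []
--             prev_was_digit = True
--         elif prev_was_digit and char.isalpha():
--             # 音调号后的字母开始新音节
--             prev_was_digit = False
--         elif i + 1 < len(pinyin_str):
--             next_char = pinyin_str[i + 1]
--             # 检查元音后是否是辅音（可能的新音节开始）
--             # 使用预编译集合快速检查
--             if char.lower() in vowels and next_char.lower() not in vowels:
--                 # 可能是音节边界，继续检查
--                 pass
--
--     if current:
--         result.append(''.join(current))
--
--     return result if result else [pinyin_str]
-- ===== SOURCE B (Python) =====
-- from typing import List
--
-- def _split_pinyin_syllables(pinyin_str: str) -> List[str]: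
--     """Split a pinyin string into syllables (cut after each tone digit),
--     built back-to-front by a single scan over the reversed string."""
--     if not pinyin_str:
--         return []
--     if ' ' in pinyin_str:
--         return pinyin_str.split()
--     if len(pinyin_str) <= 6:
--         return [pinyin_str]
--     out = []
--     cur = []  # characters of the current syllable, in reverse order
--     for ch in reversed(pinyin_str):
--         if ch.isdigit() and cur:
--             out.append(''.join(reversed(cur)))
--             cur = []
--         cur.append(ch)
--     out.append(''.join(reversed(cur)))
--     out.reverse()
--     return out
-- ===== Notes on version B (the rewrite author's own statement) =====
-- stated objective: simpler
-- what changed: A's forward enumerate-loop with current-buffer, prev_was_digit flag and a dead vowel-lookahead branch is replaced by a single scan of the reversed string that builds the syllable list back-to-front (cut before each digit that already has collected characters), dropping the dead branches and the redundant empty-filter after split().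
import Mathlib
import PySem

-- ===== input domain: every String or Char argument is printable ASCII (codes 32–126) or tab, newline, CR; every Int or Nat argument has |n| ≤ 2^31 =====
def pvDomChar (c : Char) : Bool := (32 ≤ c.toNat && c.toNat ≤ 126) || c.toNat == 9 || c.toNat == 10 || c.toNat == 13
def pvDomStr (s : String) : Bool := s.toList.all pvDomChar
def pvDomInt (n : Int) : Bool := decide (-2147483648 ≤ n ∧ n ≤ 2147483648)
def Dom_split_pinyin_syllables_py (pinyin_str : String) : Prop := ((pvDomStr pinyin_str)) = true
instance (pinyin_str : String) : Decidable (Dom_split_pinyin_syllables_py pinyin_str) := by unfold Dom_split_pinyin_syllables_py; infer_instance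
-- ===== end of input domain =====

-- B replaces A's forward char-by-char accumulation (with its dead vowel-lookahead/prev-digit branches)
-- by a single scan of the reversed string that builds the syllable list back-to-front
-- (objective: simpler; a timing run measured B faster by a constant factor).

-- ===== PORT A =====
-- _PINYIN_VOWELS (frozenset)
def pvVowels : PySem.Set Char := PySem.Set.ofList ['a', 'e', 'i', 'o', 'u', 'ü', 'v']

-- the body of A's `for i, char in enumerate(pinyin_str)` loop; state = (result, current, prev_was_digit)
def pvAStep (cs : List Char) (acc : List String × List Char × Bool) (p : Int × Char) :
    List String × List Char × Bool :=
  let current := acc.2.1 ++ [p.2]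
  if PySem.Chars.isdigit p.2 then
    (acc.1 ++ [String.ofList current], ([] : List Char), true)
  else if acc.2.2 && PySem.Chars.isalpha p.2 then
    (acc.1, current, false)
  else if p.1 + 1 < (cs.length : Int) then
    -- next_char = pinyin_str[i+1]: in range by the guard, so pyGetD is exact here
    let next := PySem.List.pyGetD cs (p.1 + 1) p.2
    if PySem.Set.contains pvVowels (PySem.Chars.lowerChar p.2)
        ∧ ¬ PySem.Set.contains pvVowels (PySem.Chars.lowerChar next) then
      (acc.1, current, acc.2.2)  -- Python: pass
    else (acc.1, current, acc.2.2)
  else (acc.1, current, acc.2.2)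

def split_pinyin_syllables_py (pinyin_str : String) : List String :=
  let cs := pinyin_str.toList
  if cs = [] then []
  else if ¬ PySem.Chars.isIn [' '] cs = true ∧ cs.length ≤ 6 then [pinyin_str]
  else if PySem.Chars.isIn [' '] cs then
    ((PySem.Chars.split₀ cs).filter (fun s => !s.isEmpty)).map String.ofList
  else
    let st := (PySem.List.enumerate cs 0).foldl (pvAStep cs) ([], [], false)
    let result := if st.2.1 ≠ [] then st.1 ++ [String.ofList st.2.1] else st.1
    if result ≠ [] then result else [pinyin_str]

-- ===== PORT B =====
-- the body of B's `for ch in reversed(pinyin_str)` loop; state = (out, cur),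
-- cur holding the current syllable's characters in reverse order
def pvBStep (acc : List String × List Char) (ch : Char) : List String × List Char :=
  if PySem.Chars.isdigit ch ∧ acc.2 ≠ [] then (acc.1 ++ [String.ofList acc.2.reverse], [ch])
  else (acc.1, acc.2 ++ [ch])

def split_pinyin_syllables_py_alt (pinyin_str : String) : List String :=
  let cs := pinyin_str.toList
  if cs = [] then []
  else if PySem.Chars.isIn [' '] cs then (PySem.Chars.split₀ cs).map String.ofList
  else if cs.length ≤ 6 then [pinyin_str]
  else
    let st := cs.reverse.foldl pvBStep ([], [])
    (st.1 ++ [String.ofList st.2.reverse]).reverse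

-- ===== PRECONDITION & SPEC =====
def Spec_split_pinyin_syllables_py (pinyin_str : String) (out : List String) : Prop := out = split_pinyin_syllables_py_alt pinyin_str
instance (pinyin_str : String) (out : List String) : Decidable (Spec_split_pinyin_syllables_py pinyin_str out) := by unfold Spec_split_pinyin_syllables_py; infer_instance

-- ===== CLAIM (what is proved, stated in full; the proofs are below) =====
def Claim_equal_split_pinyin_syllables_py : Prop := ∀ (pinyin_str : String), Dom_split_pinyin_syllables_py pinyin_str → Spec_split_pinyin_syllables_py pinyin_str (split_pinyin_syllables_py pinyin_str)

-- ===== LEMMAS AND PROOFS =====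

-- the common "cut after each digit" specification both loops compute
def pvChunks : List Char → List Char → List String
  | [], cur => if cur = [] then [] else [String.ofList cur]
  | c :: rest, cur =>
    if PySem.Chars.isdigit c then String.ofList (cur ++ [c]) :: pvChunks rest []
    else pvChunks rest (cur ++ [c])

-- characters of the first chunk / remaining chunks of pvChunks l []
def pvFirst : List Char → List Char
  | [] => []
  | c :: rest => if PySem.Chars.isdigit c then [c] else c :: pvFirst rest

def pvRestC : List Char → List String
  | [] => []
  | c :: rest => if PySem.Chars.isdigit c then pvChunks rest [] else pvRestC rest

-- A's step ignores the index and the dead vowel branch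
def pvBasic (acc : List String × List Char × Bool) (c : Char) : List String × List Char × Bool :=
  let current := acc.2.1 ++ [c]
  if PySem.Chars.isdigit c then (acc.1 ++ [String.ofList current], ([] : List Char), true)
  else if acc.2.2 && PySem.Chars.isalpha c then (acc.1, current, false)
  else (acc.1, current, acc.2.2)

theorem pvAStep_eq (cs : List Char) (acc : List String × List Char × Bool) (p : Int × Char) :
    pvAStep cs acc p = pvBasic acc p.2 := by
  simp only [pvAStep, pvBasic]
  split_ifs <;> rfl

theorem pvFoldA_enum (cs : List Char) (l : List Char) (n : Int)
    (init : List String × List Char × Bool) :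
    (PySem.List.enumerate l n).foldl (pvAStep cs) init = l.foldl pvBasic init := by
  induction l generalizing n init with
  | nil => simp [PySem.List.enumerate_nil]
  | cons c rest ih =>
    rw [PySem.List.enumerate_cons, List.foldl_cons, List.foldl_cons, pvAStep_eq, ih]

theorem pvFoldA_chunks (l : List Char) (r : List String) (cur : List Char) (prev : Bool) :
    (let st := l.foldl pvBasic (r, cur, prev);
      if st.2.1 ≠ [] then st.1 ++ [String.ofList st.2.1] else st.1) = r ++ pvChunks l cur := by
  induction l generalizing r cur prev with
  | nil =>
    simp only [List.foldl_nil, pvChunks]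
    by_cases h : cur = [] <;> simp [h]
  | cons c rest ih =>
    simp only [List.foldl_cons, pvChunks, pvBasic]
    by_cases hd : PySem.Chars.isdigit c
    · simp only [hd, if_pos]
      rw [ih]
      simp
    · simp only [hd, if_false, Bool.false_eq_true]
      by_cases hp : (prev && PySem.Chars.isalpha c) = true
      · simp only [hp, if_true]; rw [ih]
      · simp only [hp, if_false, Bool.false_eq_true]; rw [ih]

theorem pvChunks_pre (l : List Char) (h : l ≠ []) (pre : List Char) :
    pvChunks l pre = String.ofList (pre ++ pvFirst l) :: pvRestC l := by
  induction l generalizing pre with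
  | nil => exact absurd rfl h
  | cons c rest ih =>
    by_cases hd : PySem.Chars.isdigit c
    · simp [pvChunks, pvFirst, pvRestC, hd]
    · rcases rest with _ | ⟨c', rest'⟩
      · simp [pvChunks, pvFirst, pvRestC, hd]
      · rw [show pvChunks (c :: c' :: rest') pre = pvChunks (c' :: rest') (pre ++ [c]) from by
            rw [pvChunks]; simp [hd],
          ih (by simp)]
        simp [pvFirst, pvRestC, hd]

theorem pvChunks_ne_nil (l : List Char) (h : l ≠ []) : pvChunks l [] ≠ [] := by
  rw [pvChunks_pre l h]; simp

theorem pvBState_cur_ne (l : List Char) (h : l ≠ []) :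
    (List.foldr (fun x y => pvBStep y x) ([], []) l).2 ≠ [] := by
  rcases l with _ | ⟨c, rest⟩
  · exact absurd rfl h
  · simp only [List.foldr_cons, pvBStep]
    split_ifs <;> simp

theorem pvFoldB_chunks (l : List Char) (h : l ≠ []) :
    (let st := List.foldr (fun x y => pvBStep y x) (([] : List String), ([] : List Char)) l;
      (st.1 ++ [String.ofList st.2.reverse]).reverse) = pvChunks l [] := by
  induction l with
  | nil => exact absurd rfl h
  | cons c rest ih =>
    rcases rest with _ | ⟨c', rest'⟩
    · simp only [List.foldr_cons, List.foldr_nil, pvBStep, pvChunks]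
      split_ifs <;> simp_all [pvChunks]
    · have hne : (c' :: rest' : List Char) ≠ [] := by simp
      have ih' := ih hne
      have hcur := pvBState_cur_ne (c' :: rest') hne
      rcases hstate : List.foldr (fun x y => pvBStep y x) (([] : List String), ([] : List Char)) (c' :: rest') with ⟨out, cur⟩
      rw [hstate] at hcur
      simp only [hstate, pvChunks_pre _ hne, List.nil_append, List.reverse_append,
        List.reverse_singleton, List.singleton_append, List.cons.injEq] at ih'
      obtain ⟨hcur', hout⟩ := ih'
      have hcurl : cur.reverse = pvFirst (c' :: rest') := String.ofList_inj.mp hcur'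
      rw [List.foldr_cons, hstate]
      simp only [pvBStep]
      by_cases hd : PySem.Chars.isdigit c
      · rw [if_pos ⟨hd, by simpa using hcur⟩]
        rw [pvChunks_pre _ (by simp), List.nil_append]
        simp [pvFirst, pvRestC, hd, List.reverse_append, pvChunks_pre _ hne, hcurl, hout]
      · rw [if_neg (by simp [hd])]
        rw [pvChunks_pre _ (by simp), List.nil_append]
        simp [pvFirst, pvRestC, hd, List.reverse_append, hcurl, hout]

-- split() never returns empty pieces, so A's filter is the identity
theorem pv_split₀_go_ne (s cur : List Char) (acc : List (List Char))
    (hacc : ∀ x ∈ acc, x ≠ []) : ∀ x ∈ PySem.Chars.split₀.go s cur acc, x ≠ [] := by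
  induction s generalizing cur acc with
  | nil =>
    intro x hx
    simp only [PySem.Chars.split₀.go] at hx
    split at hx
    · exact hacc x (List.mem_reverse.mp hx)
    · rename_i hce
      rcases List.mem_cons.mp (List.mem_reverse.mp hx) with h | h
      · subst h; simpa [List.isEmpty_iff] using hce
      · exact hacc x h
  | cons c rest ih =>
    intro x hx
    simp only [PySem.Chars.split₀.go] at hx
    split at hx
    · split at hx
      · exact ih [] acc hacc x hx
      · rename_i hce
        refine ih [] (cur.reverse :: acc) ?_ x hx
        intro y hy
        rcases List.mem_cons.mp hy with hy | hy
        · subst hy; simpa [List.isEmpty_iff] using hce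
        · exact hacc y hy
    · exact ih (c :: cur) acc hacc x hx

theorem pv_split₀_filter (cs : List Char) :
    (PySem.Chars.split₀ cs).filter (fun s => !s.isEmpty) = PySem.Chars.split₀ cs := by
  apply List.filter_eq_self.mpr
  intro x hx
  have := pv_split₀_go_ne cs [] [] (by simp) x hx
  simpa [List.isEmpty_iff] using this

-- ===== VERDICT (by name: the statement is the Claim_ definition above) =====
theorem split_pinyin_syllables_py_spec : Claim_equal_split_pinyin_syllables_py := by
  intro s _
  unfold Spec_split_pinyin_syllables_py split_pinyin_syllables_py split_pinyin_syllables_py_alt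
  by_cases h0 : s.toList = []
  · simp [h0]
  · simp only [h0, if_false]
    by_cases hsp : PySem.Chars.isIn [' '] s.toList = true
    · simp [hsp, pv_split₀_filter]
    · by_cases h6 : s.toList.length ≤ 6
      · rw [String.length_toList] at h6
        simp [hsp, h6]
      · have hA := pvFoldA_chunks s.toList [] [] false
        have hB := pvFoldB_chunks s.toList h0
        simp only at hA hB
        rw [String.length_toList] at h6
        simp only [hsp, h6, String.length_toList, Bool.false_eq_true, not_false_eq_true,
          and_false, if_false]
        rw [pvFoldA_enum, hA, List.nil_append, if_pos (pvChunks_ne_nil s.toList h0),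
          List.foldl_reverse]
        exact hB.symm
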